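-- pv_equiv track=rewrite | github.com/pypi-data/pypi-mirror-78 | packages/pytmc/pytmc-2.7.0.tar.gz/pytmc-2.7.0/pytmc/pragmas.py | separate_configs_by_pv
-- ===== SOURCE A (Python) =====
-- def separate_configs_by_pv(config_lines):
--     '''
--     Take in a pre-parsed pragma such as::
--
--         [{'title': 'pv', 'tag': 'a'},
--          {'title': 'io', 'tag': 'io_for_a'},
--          {'title': 'pv', 'tag': 'b'},
--          {'title': 'io', 'tag': 'io_for_a'},
--          ]
--
--     Which was generated from::
--
--         pv: a
--         io: io_for_a
--         pv: b
--         io: io_for_b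
--
--     And yield the following::
--
--         ('a', [{'title': 'io', 'tag': 'io_for_a'}])
--         ('b', [{'title': 'io', 'tag': 'io_for_b'}])
--     '''
--     pv, config = None, None
--
--     for line in config_lines:
--         if line['title'] == 'pv':
--             if config is not None:
--                 yield pv, config
--
--             pv = line['tag']
--             config = []
--
--         if config is not None:
--             config.append(line)
--
--     if config is not None:
--         yield pv, config
-- ===== SOURCE B (Python) =====
-- def _split_group(lines):
--     """(lines before the first pv line, the rest starting at that pv line)."""
--     j = 0
--     while j < len(lines) and lines[j]['title'] != 'pv':
--         j += 1
--     return lines[:j], lines[j:]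
--
--
-- def separate_configs_by_pv(config_lines):
--     out = []
--     _, rest = _split_group(list(config_lines))  # lines before the first pv are dropped
--     while rest:
--         head = rest[0]
--         body, rest = _split_group(rest[1:])
--         out.append((head['tag'], [head] + body))
--     return out
-- ===== Notes on version B (the rewrite author's own statement) =====
-- stated objective: alternative
-- what changed: Replaces A's single stateful generator fold (pv/config accumulator variables) with a boundary-splitting decomposition: a helper finds the next pv index and slices, and the main loop emits one whole group per iteration.
import Mathlib
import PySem

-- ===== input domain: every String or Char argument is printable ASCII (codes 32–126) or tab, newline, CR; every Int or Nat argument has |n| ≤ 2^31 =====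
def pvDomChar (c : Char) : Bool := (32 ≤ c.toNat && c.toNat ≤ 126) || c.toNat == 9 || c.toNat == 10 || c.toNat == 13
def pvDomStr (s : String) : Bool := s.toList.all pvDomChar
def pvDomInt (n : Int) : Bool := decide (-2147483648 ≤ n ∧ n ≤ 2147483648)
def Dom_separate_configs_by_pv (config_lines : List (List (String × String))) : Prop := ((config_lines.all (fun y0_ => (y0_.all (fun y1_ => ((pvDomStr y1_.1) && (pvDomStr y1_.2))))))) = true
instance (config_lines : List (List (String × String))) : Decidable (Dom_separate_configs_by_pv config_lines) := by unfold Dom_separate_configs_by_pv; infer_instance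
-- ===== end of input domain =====

-- B groups the lines by splitting at the next pv boundary (first-pv-index + slice), instead of
-- A's single stateful fold; same outputs, same O(n) cost (objective: alternative decomposition).
-- A is a generator; the equivalence is about the materialized sequence of yielded pairs.

-- ===== PORT A =====
-- line[k] on a Python dict = first match in the association list (Pre_ guarantees the key exists
-- where A accesses it; `.getD` defaults are never reached under Pre_).
def lineGet (line : List (String × String)) (k : String) : Option String :=
  List.lookup k line

-- loop body of A: state = (pv, config, yielded-so-far); pv/config are Python's None-initialized vars
def aStep (st : Option String × Option (List (List (String × String))) × List (String × List (List (String × String))))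
    (line : List (String × String)) :
    Option String × Option (List (List (String × String))) × List (String × List (List (String × String))) :=
  let (pv, config, out) := st
  let (pv, config, out) :=
    if lineGet line "title" == some "pv" then
      let out := match config with
        | some c => out ++ [(pv.getD "", c)]   -- yield pv, config (pv is set whenever config is)
        | none => out
      (some ((lineGet line "tag").getD ""), some ([] : List (List (String × String))), out)
    else (pv, config, out)
  match config with
  | some c => (pv, some (c ++ [line]), out)    -- config.append(line)
  | none => (pv, config, out)

def separate_configs_by_pv (config_lines : List (List (String × String))) : List (String × (List (List (String × String)))) :=
  let st := config_lines.foldl aStep (none, none, [])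
  match st.2.1 with
  | some c => st.2.2 ++ [(st.1.getD "", c)]    -- final 'yield pv, config'
  | none => st.2.2

-- ===== PORT B =====
-- _split_group: j = first index whose title is 'pv' (else len); (lines[:j], lines[j:]).
-- The while-loop computing j is List.findIdx; the slices with 0 ≤ j ≤ len are take/drop.
def splitGroup (lines : List (List (String × String))) :
    List (List (String × String)) × List (List (String × String)) :=
  let j := lines.findIdx (fun l => lineGet l "title" == some "pv")
  (lines.take j, lines.drop j)

-- the 'while rest:' loop of B
def sepGroups (rest : List (List (String × String))) : List (String × (List (List (String × String)))) :=
  match rest with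
  | [] => []
  | head :: tl =>
    ((lineGet head "tag").getD "", head :: (splitGroup tl).1) :: sepGroups (splitGroup tl).2
termination_by rest.length
decreasing_by simp [splitGroup]

def separate_configs_by_pv_alt (config_lines : List (List (String × String))) : List (String × (List (List (String × String)))) :=
  sepGroups (splitGroup config_lines).2

-- ===== PRECONDITION & SPEC =====
-- Pre_ excludes exactly the inputs where the Python A raises KeyError: a line without a "title"
-- key, or a pv line without a "tag" key.
def Pre_separate_configs_by_pv (config_lines : List (List (String × String))) : Prop :=
  ∀ line ∈ config_lines, (List.lookup "title" line).isSome ∧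
    (List.lookup "title" line = some "pv" → (List.lookup "tag" line).isSome)
instance (config_lines : List (List (String × String))) : Decidable (Pre_separate_configs_by_pv config_lines) := by
  unfold Pre_separate_configs_by_pv; infer_instance

def pvWitness_separate_configs_by_pv : (List (List (String × String))) :=
  [[("title", "pv"), ("tag", "a")], [("io", "input"), ("title", "io")], [("title", "pv"), ("tag", "b")]]

def Spec_separate_configs_by_pv (config_lines : List (List (String × String))) (out : List (String × (List (List (String × String))))) : Prop := out = separate_configs_by_pv_alt config_lines
instance (config_lines : List (List (String × String))) (out : List (String × (List (List (String × String))))) : Decidable (Spec_separate_configs_by_pv config_lines out) := by unfold Spec_separate_configs_by_pv; infer_instance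

-- ===== CLAIM (what is proved, stated in full; the proofs are below) =====
def Claim_equal_separate_configs_by_pv : Prop := ∀ (config_lines : List (List (String × String))), Dom_separate_configs_by_pv config_lines → Pre_separate_configs_by_pv config_lines → Spec_separate_configs_by_pv config_lines (separate_configs_by_pv config_lines)

-- ===== LEMMAS AND PROOFS =====

theorem sepGroups_nil : sepGroups [] = [] := by unfold sepGroups; rfl

theorem sepGroups_cons (head : List (String × String)) (tl : List (List (String × String))) :
    sepGroups (head :: tl) =
      ((lineGet head "tag").getD "", head :: (splitGroup tl).1) :: sepGroups (splitGroup tl).2 := by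
  conv_lhs => unfold sepGroups

-- A's trailing 'if config is not None: yield pv, config'
def aFinish (st : Option String × Option (List (List (String × String))) × List (String × List (List (String × String)))) :
    List (String × List (List (String × String))) :=
  match st.2.1 with
  | some c => st.2.2 ++ [(st.1.getD "", c)]
  | none => st.2.2

theorem splitGroup_pv (l : List (String × String)) (ls : List (List (String × String)))
    (h : (lineGet l "title" == some "pv") = true) :
    splitGroup (l :: ls) = ([], l :: ls) := by
  simp [splitGroup, List.findIdx_cons, h]

theorem splitGroup_not_pv (l : List (String × String)) (ls : List (List (String × String)))
    (h : (lineGet l "title" == some "pv") = false) :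
    splitGroup (l :: ls) = (l :: (splitGroup ls).1, (splitGroup ls).2) := by
  simp [splitGroup, List.findIdx_cons, h]

-- fold invariant, open-group form: once a pv has been seen, the remaining fold closes the open
-- group at the next boundary and proceeds group by group.
theorem aFold_open (ls : List (List (String × String))) :
    ∀ (p : String) (c : List (List (String × String))) (out : List (String × List (List (String × String)))),
    aFinish (ls.foldl aStep (some p, some c, out)) =
      out ++ (p, c ++ (splitGroup ls).1) :: sepGroups (splitGroup ls).2 := by
  induction ls with
  | nil => intro p c out; simp [aFinish, splitGroup, sepGroups_nil]
  | cons l ls ih =>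
    intro p c out
    by_cases h : (lineGet l "title" == some "pv") = true
    · rw [splitGroup_pv l ls h]
      have hs : aStep (some p, some c, out) l =
          (some ((lineGet l "tag").getD ""), some [l], out ++ [(p, c)]) := by
        simp [aStep, h]
      rw [List.foldl_cons, hs, ih]
      rw [sepGroups_cons]
      simp
    · have h' : (lineGet l "title" == some "pv") = false := by simpa using h
      rw [splitGroup_not_pv l ls h']
      have hs : aStep (some p, some c, out) l = (some p, some (c ++ [l]), out) := by
        simp [aStep, h']
      rw [List.foldl_cons, hs, ih]
      simp

-- fold invariant, initial form: before the first pv everything is dropped.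
theorem aFold_closed (ls : List (List (String × String))) :
    ∀ (out : List (String × List (List (String × String)))),
    aFinish (ls.foldl aStep (none, none, out)) = out ++ sepGroups (splitGroup ls).2 := by
  induction ls with
  | nil => intro out; simp [aFinish, splitGroup, sepGroups_nil]
  | cons l ls ih =>
    intro out
    by_cases h : (lineGet l "title" == some "pv") = true
    · have hs : aStep (none, none, out) l =
          (some ((lineGet l "tag").getD ""), some [l], out) := by
        simp [aStep, h]
      rw [List.foldl_cons, hs, aFold_open]
      rw [splitGroup_pv l ls h, sepGroups_cons]
      simp
    · have h' : (lineGet l "title" == some "pv") = false := by simpa using h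
      have hs : aStep (none, none, out) l = (none, none, out) := by
        simp [aStep, h']
      rw [List.foldl_cons, hs, ih, splitGroup_not_pv l ls h']

-- ===== VERDICT (by name: the statement is the Claim_ definition above) =====
theorem separate_configs_by_pv_spec : Claim_equal_separate_configs_by_pv := by
  intro config_lines _ _
  unfold Spec_separate_configs_by_pv separate_configs_by_pv separate_configs_by_pv_alt
  have := aFold_closed config_lines []
  simpa [aFinish] using this
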